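-- pv_equiv track=rewrite | github.com/maddinpsy/SpiderSolitar_py | SpiderSolitar.py | allowed_cards_to_move
-- ===== SOURCE A (Python) =====
-- def allowed_cards_to_move(pile):
--     if len(pile) == 0:
--         return 0
--     elif len(pile) == 1:
--         return 1
--     else:
--         connected_count = 0
--         for i in range(len(pile) - 2, -1, -1):
--             if pile[i][0] == pile[i + 1][0] + 1 and pile[i][1] == pile[i + 1][1]:
--                 connected_count += 1
--             else:
--                 break
--         return connected_count
-- ===== SOURCE B (Python) =====
-- def allowed_cards_to_move(pile):
--     if len(pile) == 0:
--         return 0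
--     if len(pile) == 1:
--         return 1
--     run = 0
--     for i in range(1, len(pile)):
--         if pile[i - 1][0] == pile[i][0] + 1 and pile[i - 1][1] == pile[i][1]:
--             run += 1
--         else:
--             run = 0
--     return run
-- ===== Notes on version B (the rewrite author's own statement) =====
-- stated objective: alternative
-- what changed: Replaces A's backward scan with early break by a single forward pass that resets a run counter on each broken link; the run counter ends holding the length of the trailing connected run.
import Mathlib
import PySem

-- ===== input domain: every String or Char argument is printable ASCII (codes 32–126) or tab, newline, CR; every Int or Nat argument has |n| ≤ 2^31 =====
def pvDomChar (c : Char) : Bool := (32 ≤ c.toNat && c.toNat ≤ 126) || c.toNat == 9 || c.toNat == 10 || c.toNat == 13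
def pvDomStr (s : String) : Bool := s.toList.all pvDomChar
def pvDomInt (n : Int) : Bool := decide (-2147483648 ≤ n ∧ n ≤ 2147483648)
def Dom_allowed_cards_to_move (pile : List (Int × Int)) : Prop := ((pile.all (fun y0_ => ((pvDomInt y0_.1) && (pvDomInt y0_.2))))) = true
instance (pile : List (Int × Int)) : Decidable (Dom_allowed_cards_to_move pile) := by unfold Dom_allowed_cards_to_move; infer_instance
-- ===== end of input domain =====

-- B replaces A's backward break-scan with one forward pass resetting a run counter (objective: alternative).

-- ===== PORT A =====
-- A's backward loop 'for i in range(len(pile)-2, -1, -1)' with break: recursion over the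
-- index list, returning the accumulator at the first failed comparison (the break).
-- All indices visited are in range, so pyGet? is some there; .getD (0,0) only totalizes.
def aLoop (pile : List (Int × Int)) : List Int → Int → Int
  | [], c => c
  | i :: rest, c =>
      let x := (PySem.List.pyGet? pile i).getD (0, 0)
      let y := (PySem.List.pyGet? pile (i + 1)).getD (0, 0)
      if x.1 = y.1 + 1 ∧ x.2 = y.2 then aLoop pile rest (c + 1) else c

def allowed_cards_to_move (pile : List (Int × Int)) : Int :=
  if pile.length = 0 then 0
  else if pile.length = 1 then 1
  else aLoop pile (PySem.List.pyRange ((pile.length : Int) - 2) (-1) (-1)) 0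

-- ===== PORT B =====
-- B's forward pass 'for i in range(1, len(pile))', resetting run to 0 on a broken link.
def allowed_cards_to_move_alt (pile : List (Int × Int)) : Int :=
  if pile.length = 0 then 0
  else if pile.length = 1 then 1
  else
    (PySem.List.pyRange 1 (pile.length : Int) 1).foldl
      (fun run i =>
        let x := (PySem.List.pyGet? pile (i - 1)).getD (0, 0)
        let y := (PySem.List.pyGet? pile i).getD (0, 0)
        if x.1 = y.1 + 1 ∧ x.2 = y.2 then run + 1 else 0) 0

-- ===== PRECONDITION & SPEC =====
def Spec_allowed_cards_to_move (pile : List (Int × Int)) (out : Int) : Prop := out = allowed_cards_to_move_alt pile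
instance (pile : List (Int × Int)) (out : Int) : Decidable (Spec_allowed_cards_to_move pile out) := by unfold Spec_allowed_cards_to_move; infer_instance

-- ===== CLAIM (what is proved, stated in full; the proofs are below) =====
def Claim_equal_allowed_cards_to_move : Prop := ∀ (pile : List (Int × Int)), Dom_allowed_cards_to_move pile → Spec_allowed_cards_to_move pile (allowed_cards_to_move pile)

-- ===== LEMMAS AND PROOFS =====

-- the comparison both programs make between pile[i] and pile[i+1]
def pvCond (pile : List (Int × Int)) (i : Int) : Bool :=
  let x := (PySem.List.pyGet? pile i).getD (0, 0)
  let y := (PySem.List.pyGet? pile (i + 1)).getD (0, 0)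
  decide (x.1 = y.1 + 1 ∧ x.2 = y.2)

theorem aLoop_eq_takeWhile (pile : List (Int × Int)) (l : List Int) (c : Int) :
    aLoop pile l c = c + ((l.takeWhile (pvCond pile)).length : Int) := by
  induction l generalizing c with
  | nil => simp [aLoop]
  | cons i rest ih =>
      by_cases h : ((PySem.List.pyGet? pile i).getD (0, 0)).1
            = ((PySem.List.pyGet? pile (i + 1)).getD (0, 0)).1 + 1
          ∧ ((PySem.List.pyGet? pile i).getD (0, 0)).2
            = ((PySem.List.pyGet? pile (i + 1)).getD (0, 0)).2
      · simp [aLoop, pvCond, h, ih]; omega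
      · simp [aLoop, pvCond, h]

theorem foldl_reset_eq (L : List Bool) :
    L.foldl (fun r b => if b then r + 1 else 0) (0 : Int)
      = ((L.reverse.takeWhile id).length : Int) := by
  induction L using List.reverseRecOn with
  | nil => simp
  | append_singleton l b ih =>
      cases b <;> simp [List.foldl_append, ih]

theorem allowed_cards_to_move_spec' (pile : List (Int × Int)) :
    allowed_cards_to_move pile = allowed_cards_to_move_alt pile := by
  unfold allowed_cards_to_move allowed_cards_to_move_alt
  by_cases h0 : pile.length = 0
  · simp [h0]
  by_cases h1 : pile.length = 1
  · simp [h1]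
  simp only [h0, h1, if_false]
  -- rewrite B's fold as a fold over the list of booleans
  have hB :
      (PySem.List.pyRange 1 (pile.length : Int) 1).foldl
        (fun run i =>
          let x := (PySem.List.pyGet? pile (i - 1)).getD (0, 0)
          let y := (PySem.List.pyGet? pile i).getD (0, 0)
          if x.1 = y.1 + 1 ∧ x.2 = y.2 then run + 1 else 0) 0
      = ((PySem.List.pyRange 1 (pile.length : Int) 1).map
          (fun i => pvCond pile (i - 1))).foldl
          (fun r b => if b then r + 1 else 0) (0 : Int) := by
    rw [List.foldl_map]
    apply PySem.List.foldl_congr_mem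
    intro r i _
    by_cases h : (((PySem.List.pyGet? pile (i - 1)).getD (0, 0)).1
          = ((PySem.List.pyGet? pile i).getD (0, 0)).1 + 1
        ∧ ((PySem.List.pyGet? pile (i - 1)).getD (0, 0)).2
          = ((PySem.List.pyGet? pile i).getD (0, 0)).2)
    · simp [pvCond, h, show i - 1 + 1 = i by omega]
    · simp [pvCond, h, show i - 1 + 1 = i by omega]
  rw [hB]
  rw [aLoop_eq_takeWhile, foldl_reset_eq]
  -- both ranges come from List.range (pile.length - 1)
  have hn : 1 ≤ (pile.length : Int) := by
    have : pile.length ≠ 0 := h0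
    omega
  have hA : PySem.List.pyRange ((pile.length : Int) - 2) (-1) (-1)
      = (PySem.List.pyRange 0 ((pile.length : Int) - 1) 1).reverse := by
    rw [PySem.List.pyRange_neg_one_eq_reverse]
    have h2 : ((pile.length : Int) - 2) + 1 = (pile.length : Int) - 1 := by omega
    rw [h2]
    norm_num
  rw [hA]
  have hmapB : (PySem.List.pyRange 1 (pile.length : Int) 1).map (fun i => pvCond pile (i - 1))
      = (PySem.List.pyRange 0 ((pile.length : Int) - 1) 1).map (pvCond pile) := by
    rw [PySem.List.pyRange_one, PySem.List.pyRange_one]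
    simp only [List.map_map]
    have hlen : ((pile.length : Int) - 1).toNat = ((pile.length : Int) - 1 - 0).toNat := by
      norm_num
    rw [← hlen]
    apply List.map_congr_left
    intro k _
    simp only [Function.comp]
    congr 1
    omega
  rw [hmapB, ← List.map_reverse, List.takeWhile_map]
  simp

-- ===== VERDICT (by name: the statement is the Claim_ definition above) =====
theorem allowed_cards_to_move_spec : Claim_equal_allowed_cards_to_move := by
  intro pile _
  exact allowed_cards_to_move_spec' pile
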